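-- pv_equiv track=rewrite | github.com/gurujeetkhalsa/aga | bayrate/stage_reports.py | _distinct_player_ids
-- ===== SOURCE A (Python) =====
-- from typing import Any, Iterable, Protocol
--
-- def _distinct_player_ids(player_ids: Iterable[int]) -> list[int]:
--     return sorted(
--         {
--             player_id
--             for player_id in (_coerce_int(player_id) for player_id in player_ids)
--             if player_id is not None
--         }
--     )
--
-- def _coerce_int(value: Any) -> int | None:
--     if value is None:
--         return None
--     try:
--         text = str(value).strip()
--         if not text:
--             return None
--         return int(float(text))
--     except (TypeError, ValueError):
--         return None
-- ===== SOURCE B (Python) =====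
-- from typing import Any, Iterable
--
--
-- def _coerce_int(value: Any) -> int | None:
--     if value is None:
--         return None
--     try:
--         text = str(value).strip()
--         if not text:
--             return None
--         return int(float(text))
--     except (TypeError, ValueError):
--         return None
--
--
-- def _distinct_player_ids(player_ids: Iterable[int]) -> list[int]:
--     # Online ordered insertion: keep `out` sorted and duplicate-free at all
--     # times; no set and no sorting pass.  The insertion point is found by a
--     # hand-written binary search (leftmost position with out[pos] >= v).
--     out: list[int] = []
--     for p in player_ids:
--         v = _coerce_int(p)
--         if v is None:
--             continue
--         lo, hi = 0, len(out)
--         while lo < hi: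
--             mid = (lo + hi) // 2
--             if out[mid] < v:
--                 lo = mid + 1
--             else:
--                 hi = mid
--         if lo == len(out) or out[lo] != v:
--             out.insert(lo, v)
--     return out
-- ===== Notes on version B (the rewrite author's own statement) =====
-- stated objective: alternative
-- what changed: B builds no set and performs no sorting pass: it maintains a sorted duplicate-free output list incrementally, locating each coerced id's position by a hand-written binary search and inserting it there unless already present (online ordered insertion), whereas A collects a hash set and then calls sorted().
import Mathlib
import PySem

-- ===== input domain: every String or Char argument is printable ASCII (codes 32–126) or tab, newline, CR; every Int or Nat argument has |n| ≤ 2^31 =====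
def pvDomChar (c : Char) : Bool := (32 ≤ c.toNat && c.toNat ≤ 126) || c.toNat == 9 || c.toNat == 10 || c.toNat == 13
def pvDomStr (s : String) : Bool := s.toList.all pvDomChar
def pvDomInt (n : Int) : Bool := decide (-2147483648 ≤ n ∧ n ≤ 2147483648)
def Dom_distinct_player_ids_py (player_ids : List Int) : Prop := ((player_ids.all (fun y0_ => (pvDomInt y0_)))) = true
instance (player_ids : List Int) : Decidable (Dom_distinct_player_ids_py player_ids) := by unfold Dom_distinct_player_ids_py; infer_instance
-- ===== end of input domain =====

-- B drops A's set and sorting pass entirely: it maintains a sorted duplicate-free output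
-- list incrementally, binary-searching each id's position and inserting it there (alternative).

-- ===== PORT A =====
-- _coerce_int, ported by hand for inputs of type Int: `value` is an int, never None;
-- str(value).strip() is its nonempty decimal rendering, and int(float(text)) returns
-- value exactly (float is exact for |value| ≤ 2^31, the stated domain), so the chain
-- yields `some value`. Exact on Dom_distinct_player_ids_py.
def coerce_int_py (value : Int) : Option Int := some value

def distinct_player_ids_py (player_ids : List Int) : List Int :=
  PySem.List.sorted (PySem.Set.ofList (player_ids.filterMap coerce_int_py)) (fun x => x) false

-- ===== PORT B =====
-- B's `while lo < hi` binary-search loop, step for step.  `out[mid]` always has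
-- 0 ≤ mid < out.length (mid < hi ≤ len is a loop invariant), so `getD _ 0`'s
-- default is never used; exact on that range.
def bisectLoop (out : List Int) (v : Int) (lo hi : Nat) : Nat :=
  if lo < hi then
    let mid := (lo + hi) / 2
    if out.getD mid 0 < v then bisectLoop out v (mid + 1) hi
    else bisectLoop out v lo mid
  else lo
termination_by hi - lo
decreasing_by all_goals omega

-- B's loop body after coercion: find the insertion point, skip if present, else insert.
def insBisect (out : List Int) (v : Int) : List Int :=
  let lo := bisectLoop out v 0 out.length
  if lo = out.length ∨ out.getD lo 0 ≠ v then out.insertIdx lo v else out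

def distinct_player_ids_py_alt (player_ids : List Int) : List Int :=
  player_ids.foldl
    (fun out p =>
      match coerce_int_py p with
      | none => out
      | some v => insBisect out v) []

-- ===== PRECONDITION & SPEC =====
def Spec_distinct_player_ids_py (player_ids : List Int) (out : List Int) : Prop := out = distinct_player_ids_py_alt player_ids
instance (player_ids : List Int) (out : List Int) : Decidable (Spec_distinct_player_ids_py player_ids out) := by unfold Spec_distinct_player_ids_py; infer_instance

-- ===== CLAIM (what is proved, stated in full; the proofs are below) =====
def Claim_equal_distinct_player_ids_py : Prop := ∀ (player_ids : List Int), Dom_distinct_player_ids_py player_ids → Spec_distinct_player_ids_py player_ids (distinct_player_ids_py player_ids)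

-- ===== LEMMAS AND PROOFS =====

-- l.insert(n, a) splits the list at n (n ≤ len).
theorem insertIdx_split (l : List Int) (n : Nat) (a : Int) (h : n ≤ l.length) :
    l.insertIdx n a = l.take n ++ a :: l.drop n := by
  induction l generalizing n with
  | nil =>
    have hn0 : n = 0 := by simpa using h
    subst hn0; simp
  | cons x xs ih =>
    cases n with
    | zero => simp
    | succ m =>
      simp only [List.length_cons, Nat.add_le_add_iff_right] at h
      show x :: xs.insertIdx m a = _
      rw [ih m h]; simp

-- In a (≤)-sorted list, values are monotone in the index.
theorem getD_mono (out : List Int) (h : out.Pairwise (· ≤ ·)) {i j : Nat}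
    (hij : i ≤ j) (hj : j < out.length) : out.getD i 0 ≤ out.getD j 0 := by
  rcases Nat.eq_or_lt_of_le hij with rfl | hlt
  · exact le_refl _
  · rw [List.getD_eq_getElem _ _ (lt_trans hlt hj), List.getD_eq_getElem _ _ hj]
    exact List.pairwise_iff_getElem.1 h i j (lt_trans hlt hj) hj hlt

-- Binary-search correctness: the returned index separates the values < v from the rest.
theorem bisectLoop_spec (out : List Int) (v : Int) (h : out.Pairwise (· ≤ ·)) :
    ∀ (lo hi : Nat), hi ≤ out.length → lo ≤ hi →
    (∀ i, i < lo → out.getD i 0 < v) →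
    (∀ i, hi ≤ i → i < out.length → ¬ out.getD i 0 < v) →
    bisectLoop out v lo hi ≤ out.length ∧
    (∀ i, i < bisectLoop out v lo hi → out.getD i 0 < v) ∧
    (∀ i, bisectLoop out v lo hi ≤ i → i < out.length → ¬ out.getD i 0 < v) := by
  intro lo hi
  induction hn : hi - lo using Nat.strong_induction_on generalizing lo hi with
  | _ n ih =>
    intro hhi hlohi hlow hhigh
    rw [bisectLoop]
    by_cases hlt : lo < hi
    · rw [if_pos hlt]
      set mid := (lo + hi) / 2 with hmid
      have hmlt : mid < hi := by omega
      have hmlen : mid < out.length := lt_of_lt_of_le hmlt hhi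
      by_cases hc : out.getD mid 0 < v
      · rw [if_pos hc]
        exact ih (hi - (mid + 1)) (by omega) (mid + 1) hi rfl hhi (by omega)
          (fun i hi' => lt_of_le_of_lt (getD_mono out h (by omega) hmlen) hc) hhigh
      · rw [if_neg hc]
        exact ih (mid - lo) (by omega) lo mid rfl (le_of_lt hmlen) (by omega) hlow
          (fun i hi' hilen => fun hvi =>
            hc (lt_of_le_of_lt (getD_mono out h hi' hilen) hvi))
    · rw [if_neg hlt]
      have : lo = hi := by omega
      exact ⟨by omega, hlow, by rw [this]; exact hhigh⟩

-- Step correctness: on a strictly sorted accumulator, insBisect keeps it strictly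
-- sorted and adds exactly v to its members.
theorem insBisect_spec (out : List Int) (v : Int) (h : out.Pairwise (· < ·)) :
    (insBisect out v).Pairwise (· < ·) ∧
    ∀ y, y ∈ insBisect out v ↔ y ∈ out ∨ y = v := by
  have hle : out.Pairwise (· ≤ ·) := h.imp le_of_lt
  obtain ⟨hrlen, hlow, hhigh⟩ := bisectLoop_spec out v hle 0 out.length le_rfl
    (Nat.zero_le _) (by omega) (by intro i h1 h2; omega)
  unfold insBisect
  set r := bisectLoop out v 0 out.length with hr
  by_cases hc : r = out.length ∨ out.getD r 0 ≠ v
  · rw [if_pos hc]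
    have hsplit : out.insertIdx r v = out.take r ++ v :: out.drop r :=
      insertIdx_split out r v hrlen
    -- every element after position r is strictly greater than v
    have hgt : ∀ i, r ≤ i → i < out.length → v < out.getD i 0 := by
      intro i hi hilen
      have hrl : r < out.length := lt_of_le_of_lt hi hilen
      have h1 : v ≤ out.getD r 0 := le_of_not_gt (hhigh r le_rfl hrl)
      have h2 : v ≠ out.getD r 0 := by
        rcases hc with hc | hc
        · omega
        · exact fun he => hc he.symm
      have h3 : out.getD r 0 ≤ out.getD i 0 := getD_mono out hle hi hilen
      omega
    have htake : ∀ y ∈ out.take r, y < v := by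
      intro y hy
      obtain ⟨i, hilt, hyi⟩ := List.mem_take_iff_getElem.1 hy
      have hir : i < r := lt_of_lt_of_le hilt (min_le_left _ _)
      have := hlow i hir
      rw [List.getD_eq_getElem _ _ (lt_of_lt_of_le hir hrlen)] at this
      omega
    have hdrop : ∀ y ∈ out.drop r, v < y := by
      intro y hy
      rw [List.mem_iff_getElem] at hy
      obtain ⟨i, hilt, hyi⟩ := hy
      rw [List.getElem_drop] at hyi
      have hlen : r + i < out.length := by
        have := List.length_drop (l := out) (i := r); omega
      have := hgt (r + i) (by omega) hlen
      rw [List.getD_eq_getElem _ _ hlen] at this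
      omega
    constructor
    · rw [hsplit, List.pairwise_append]
      refine ⟨h.sublist (List.take_sublist _ _), ?_, ?_⟩
      · rw [List.pairwise_cons]
        exact ⟨hdrop, h.sublist (List.drop_sublist _ _)⟩
      · intro a ha b hb
        rcases List.mem_cons.1 hb with rfl | hb'
        · exact htake a ha
        · exact lt_trans (htake a ha) (hdrop b hb')
    · intro y
      rw [List.mem_insertIdx hrlen]
      tauto
  · rw [if_neg hc]
    push Not at hc
    obtain ⟨hrl, hrv⟩ := hc
    have hrlt : r < out.length := lt_of_le_of_ne hrlen hrl
    have hvmem : v ∈ out := by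
      rw [← hrv, List.getD_eq_getElem _ _ hrlt]
      exact List.getElem_mem _
    exact ⟨h, fun y => ⟨Or.inl, fun hy => by rcases hy with hy | rfl <;> [exact hy; exact hvmem]⟩⟩

-- Invariant of B's fold: the accumulator stays strictly sorted, and its members
-- are the initial accumulator's members plus the ids seen so far.
theorem fold_inv (xs : List Int) : ∀ (acc : List Int), acc.Pairwise (· < ·) →
    (xs.foldl (fun out p => insBisect out p) acc).Pairwise (· < ·) ∧
    ∀ y, y ∈ xs.foldl (fun out p => insBisect out p) acc ↔ y ∈ acc ∨ y ∈ xs := by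
  induction xs with
  | nil => intro acc h; simpa using h
  | cons p ps ih =>
    intro acc h
    simp only [List.foldl_cons]
    obtain ⟨hstep, hstepmem⟩ := insBisect_spec acc p h
    obtain ⟨hpw, hmem⟩ := ih (insBisect acc p) hstep
    refine ⟨hpw, fun y => ?_⟩
    rw [hmem y, hstepmem]
    simp; tauto

theorem distinct_eq (xs : List Int) :
    distinct_player_ids_py xs = distinct_player_ids_py_alt xs := by
  unfold distinct_player_ids_py
  have halt : distinct_player_ids_py_alt xs
      = xs.foldl (fun out p => insBisect out p) [] := rfl
  rw [halt]
  obtain ⟨hpw, hmem⟩ := fold_inv xs [] (by simp)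
  set r := xs.foldl (fun out p => insBisect out p) [] with hrdef
  refine PySem.List.sorted_eq_of_perm_of_pairwise_lt _ r (fun x => x) ?_ hpw
  rw [List.perm_ext_iff_of_nodup (hpw.imp fun h => ne_of_lt h) (PySem.Set.nodup_ofList _)]
  intro a
  rw [hmem a, PySem.Set.mem_ofList]
  simp [coerce_int_py]

-- ===== VERDICT (by name: the statement is the Claim_ definition above) =====
theorem distinct_player_ids_py_spec : Claim_equal_distinct_player_ids_py := by
  intro xs _
  unfold Spec_distinct_player_ids_py
  exact distinct_eq xs
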